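-- pv_equiv track=rewrite | github.com/RitvikKhanna/Playfair-Cipher-Decryption | Solutions/a10.py | getCTBigrams
-- ===== SOURCE A (Python) =====
-- def preproc(aString):
--     # convert to uppercase, remove non-alpha chars (keep spaces), split into words
--     s = aString.upper()
--     for c in s:
--         if c not in ' ABCDEFGHIJKLMNOPQRSTUVWXYZ':
--             s = s.replace(c, ' ')
--
--     s = s.split()
--     return s
--
-- def getCTBigrams(ciphertext):
--     # different than corpus bigrams bc these must not overlap
--     bigrams = {}
--
--     # remove non-alpha chars, convert to uppercase etc
--     ciphertext = preproc(ciphertext)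
--
--     for word in ciphertext:
--         # get bigrams and their counts
--         if len(word) ==1:
--             # word is too small to have bigrams
--             continue
--
--         # word is large enough to have bigrams
--         i = 0
--         while i < len(word)-1:
--             bigram = word[i]+word[i+1]
--             if bigram in bigrams:
--                 # increment its count
--                 bigrams[bigram] +=1
--             else:
--                 # set count to 1
--                 bigrams[bigram] = 1
--             # go to the next 2 chars
--             i += 2
--
--     # return the dict of bigram counts
--     return bigrams
-- ===== SOURCE B (Python) =====
-- def getCTBigrams(ciphertext):
--     # single streaming pass over the raw text: no cleaned string, no word list.
--     # 'pending' holds an unpaired letter of the current word; any non-letter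
--     # (after uppercasing) ends the word and discards the unpaired letter, which
--     # reproduces the non-overlapping pairing with the trailing odd char dropped.
--     counts = {}
--     pending = None
--     for c in ciphertext.upper():
--         if c in 'ABCDEFGHIJKLMNOPQRSTUVWXYZ':
--             if pending is None:
--                 pending = c
--             else:
--                 bg = pending + c
--                 counts[bg] = counts.get(bg, 0) + 1
--                 pending = None
--         else:
--             pending = None
--     return counts
-- ===== Notes on version B (the rewrite author's own statement) =====
-- stated objective: alternative
-- what changed: A runs a staged pipeline (replace()-based cleaning of the whole string per offending character, split() into a word list, then an index-cursor while loop over each word); B makes one streaming pass over the raw uppercased characters with a pending-unpaired-letter accumulator, counting a bigram whenever a second letter arrives and resetting on any non-letter, so no cleaned string and no word list are ever built.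
import Mathlib
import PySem

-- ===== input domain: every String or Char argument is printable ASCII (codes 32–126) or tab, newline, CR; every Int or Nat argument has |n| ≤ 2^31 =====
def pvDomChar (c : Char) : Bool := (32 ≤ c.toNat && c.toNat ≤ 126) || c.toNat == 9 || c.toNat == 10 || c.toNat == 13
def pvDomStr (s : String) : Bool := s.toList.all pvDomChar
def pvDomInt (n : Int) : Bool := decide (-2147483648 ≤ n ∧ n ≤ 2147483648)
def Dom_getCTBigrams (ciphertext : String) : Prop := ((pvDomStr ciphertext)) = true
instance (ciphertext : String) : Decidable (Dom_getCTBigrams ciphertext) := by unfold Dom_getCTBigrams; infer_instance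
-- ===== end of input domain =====

-- B replaces A's staged pipeline (clean the whole string by repeated replace(), split
-- into a word list, walk each word with an index cursor) by ONE streaming pass over the
-- uppercased text with a pending-letter accumulator; objective: alternative.

-- ===== PORT A =====
-- preproc: upper, then 'for c in s: if c not in alphabet: s = s.replace(c, " ")', then split()
def pvPreprocA (aString : String) : List String :=
  let s := (PySem.Str.upper aString).toList
  let s2 := s.foldl (fun acc c =>
      if PySem.Chars.isIn [c] " ABCDEFGHIJKLMNOPQRSTUVWXYZ".toList = false
      then PySem.Chars.replace acc [c] [' '] else acc) s
  (PySem.Chars.split₀ s2).map String.ofList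

-- the 'while i < len(word)-1: … ; i += 2' loop (indices always in range, so getD is exact)
def pvWhileA (w : List Char) (i : Nat) (d : PySem.Dict String Int) : PySem.Dict String Int :=
  if i < w.length - 1 then
    let bigram := String.ofList [w.getD i ' ', w.getD (i + 1) ' ']
    let d' := if d.contains bigram then d.modify bigram 0 (fun v => v + 1) else d.insert bigram 1
    pvWhileA w (i + 2) d'
  else d
termination_by w.length - i
decreasing_by omega

def getCTBigrams (ciphertext : String) : List (String × Int) :=
  ((pvPreprocA ciphertext).foldl
    (fun d word => if PySem.Str.len word == 1 then d else pvWhileA word.toList 0 d)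
    (PySem.Dict.mk [])).items

-- ===== PORT B =====
-- `c in 'ABCDEFGHIJKLMNOPQRSTUVWXYZ'`
def pvIsLetter (c : Char) : Bool := PySem.Chars.isIn [c] "ABCDEFGHIJKLMNOPQRSTUVWXYZ".toList

-- the body of B's single for-loop; state = (pending, counts)
def pvStepB (st : Option Char × PySem.Dict String Int) (c : Char) :
    Option Char × PySem.Dict String Int :=
  if pvIsLetter c then
    match st.1 with
    | none => (some c, st.2)
    | some a =>
      let bg := String.ofList [a, c]
      (none, st.2.insert bg (st.2.getD bg 0 + 1))
  else (none, st.2)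

def getCTBigrams_alt (ciphertext : String) : List (String × Int) :=
  (((PySem.Str.upper ciphertext).toList.foldl pvStepB (none, PySem.Dict.mk [])).2).items

-- ===== PRECONDITION & SPEC =====
def Spec_getCTBigrams (ciphertext : String) (out : List (String × Int)) : Prop := out = getCTBigrams_alt ciphertext
instance (ciphertext : String) (out : List (String × Int)) : Decidable (Spec_getCTBigrams ciphertext out) := by unfold Spec_getCTBigrams; infer_instance

-- ===== CLAIM (what is proved, stated in full; the proofs are below) =====
def Claim_equal_getCTBigrams : Prop := ∀ (ciphertext : String), Dom_getCTBigrams ciphertext → Spec_getCTBigrams ciphertext (getCTBigrams ciphertext)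

-- ===== LEMMAS AND PROOFS =====

-- the counting action both programs perform on one bigram pair
def pvTally (d : PySem.Dict String Int) (ab : Char × Char) : PySem.Dict String Int :=
  d.insert (String.ofList [ab.1, ab.2]) (d.getD (String.ofList [ab.1, ab.2]) 0 + 1)

-- the non-overlapping pairs of a word (proof-side view of both loops)
def pvPairsB : List Char → List (Char × Char)
  | a :: b :: t => (a, b) :: pvPairsB t
  | _ => []

-- c is in A's keep-set (letter or space)
def pvGood (c : Char) : Prop := PySem.Chars.isIn [c] " ABCDEFGHIJKLMNOPQRSTUVWXYZ".toList = true

-- the per-character cleaning map A's replace loop amounts to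
def pvClean (c : Char) : Char :=
  if PySem.Chars.isIn [c] " ABCDEFGHIJKLMNOPQRSTUVWXYZ".toList then c else ' '

-- ---- literal-alphabet facts ----
lemma pv_isIn_singleton (c : Char) (l : List Char) : PySem.Chars.isIn [c] l = true ↔ c ∈ l := by
  rw [PySem.Chars.isIn_iff_infix]; exact List.singleton_infix_iff c l

lemma pv_letter_nonspace (c : Char) (h : pvIsLetter c = true) : PySem.Chars.isspace c = false := by
  have hm : c ∈ "ABCDEFGHIJKLMNOPQRSTUVWXYZ".toList := (pv_isIn_singleton _ _).mp h
  have hall : ("ABCDEFGHIJKLMNOPQRSTUVWXYZ".toList.all (fun r => !PySem.Chars.isspace r)) = true := by rfl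
  simpa using List.all_eq_true.mp hall c hm

lemma pv_letter_good (c : Char) (h : pvIsLetter c = true) : pvGood c := by
  have hm : c ∈ "ABCDEFGHIJKLMNOPQRSTUVWXYZ".toList := (pv_isIn_singleton _ _).mp h
  have : c ∈ " ABCDEFGHIJKLMNOPQRSTUVWXYZ".toList := by
    rw [show " ABCDEFGHIJKLMNOPQRSTUVWXYZ".toList
        = ' ' :: "ABCDEFGHIJKLMNOPQRSTUVWXYZ".toList from rfl]
    exact List.mem_cons_of_mem _ hm
  exact (pv_isIn_singleton _ _).mpr this

lemma pv_good_nonletter_space (c : Char) (hg : pvGood c) (h : pvIsLetter c = false) : c = ' ' := by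
  have hm : c ∈ " ABCDEFGHIJKLMNOPQRSTUVWXYZ".toList := (pv_isIn_singleton _ _).mp hg
  rw [show " ABCDEFGHIJKLMNOPQRSTUVWXYZ".toList
      = ' ' :: "ABCDEFGHIJKLMNOPQRSTUVWXYZ".toList from rfl] at hm
  rcases List.mem_cons.mp hm with h' | h'
  · exact h'
  · have : pvIsLetter c = true := (pv_isIn_singleton _ _).mpr h'
    rw [h] at this; exact absurd this (by simp)

lemma pv_good_nonspace_letter (c : Char) (hg : pvGood c) (hs : PySem.Chars.isspace c = false) :
    pvIsLetter c = true := by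
  by_cases h : pvIsLetter c = true
  · exact h
  · have := pv_good_nonletter_space c hg (by simpa using h)
    subst this
    exact absurd hs (by decide)

lemma pv_clean_good (c : Char) : pvGood (pvClean c) := by
  unfold pvClean pvGood
  by_cases h : PySem.Chars.isIn [c] " ABCDEFGHIJKLMNOPQRSTUVWXYZ".toList = true
  · rw [if_pos h]; exact h
  · rw [if_neg h]; decide

-- ---- A's cleaning loop = per-character map (exact replace semantics) ----
lemma pv_go_singleton (c : Char) (new : List Char) :
    ∀ (fuel : Nat) (l acc : List Char), l.length ≤ fuel →
      PySem.Chars.replace.go [c] new fuel l acc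
        = acc.reverse ++ l.flatMap (fun d => if d == c then new else [d])
  | 0, l, acc => by
    intro h
    have : l = [] := by cases l <;> simp_all
    subst this; simp [PySem.Chars.replace.go]
  | fuel+1, [], acc => by intro h; simp [PySem.Chars.replace.go]
  | fuel+1, d :: t, acc => by
    intro h
    rw [PySem.Chars.replace.go]
    have hpre : [c].isPrefixOf (d :: t) = (c == d) := by simp [List.isPrefixOf]
    by_cases hd : c = d
    · rw [hpre, if_pos (by simp [hd])]
      simp only [List.length_cons, List.length_nil, Nat.zero_add, List.drop_succ_cons,
        List.drop_zero]
      rw [pv_go_singleton c new fuel t (new.reverse ++ acc) (by simpa using h)]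
      simp [hd.symm]
    · rw [hpre, if_neg (by simp [hd])]
      rw [pv_go_singleton c new fuel t (d :: acc) (by simpa using h)]
      simp [Ne.symm hd]

lemma pv_replace_singleton (s : List Char) (c : Char) (new : List Char) :
    PySem.Chars.replace s [c] new = s.flatMap (fun d => if d == c then new else [d]) := by
  rw [PySem.Chars.replace]
  simp only [List.isEmpty, Bool.false_eq_true, if_false]
  exact pv_go_singleton c new s.length s [] le_rfl

lemma pv_replace_singleton_map (s : List Char) (c : Char) :
    PySem.Chars.replace s [c] [' '] = s.map (fun d => if d = c then ' ' else d) := by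
  rw [pv_replace_singleton]
  have h : (fun d => if (d == c) = true then [' '] else [d])
      = fun d => [if d = c then ' ' else d] := by
    funext d; by_cases hd : d = c <;> simp [hd]
  rw [h, ← List.map_eq_flatMap]

lemma pv_foldl_clean (cs : List Char) : ∀ (acc : List Char),
    (∀ d ∈ acc, PySem.Chars.isIn [d] " ABCDEFGHIJKLMNOPQRSTUVWXYZ".toList = false → d ∈ cs) →
    cs.foldl (fun acc c =>
        if PySem.Chars.isIn [c] " ABCDEFGHIJKLMNOPQRSTUVWXYZ".toList = false
        then PySem.Chars.replace acc [c] [' '] else acc) acc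
      = acc.map pvClean := by
  induction cs with
  | nil =>
    intro acc h
    simp only [List.foldl_nil]
    conv_lhs => rw [← List.map_id acc]
    apply List.map_congr_left
    intro d hd
    unfold pvClean
    by_cases hg : PySem.Chars.isIn [d] " ABCDEFGHIJKLMNOPQRSTUVWXYZ".toList = true
    · rw [if_pos hg]; rfl
    · exact absurd (h d hd (by simpa using hg)) (by simp)
  | cons c cs ih =>
    intro acc h
    simp only [List.foldl_cons]
    by_cases hc : PySem.Chars.isIn [c] " ABCDEFGHIJKLMNOPQRSTUVWXYZ".toList = false
    · rw [if_pos hc, pv_replace_singleton_map]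
      rw [ih _ ?_]
      · rw [List.map_map]
        apply List.map_congr_left
        intro d _
        unfold pvClean
        by_cases hd : d = c
        · subst hd
          simp only [Function.comp]
          simp only [if_true]
          rw [if_pos (show PySem.Chars.isIn [' '] " ABCDEFGHIJKLMNOPQRSTUVWXYZ".toList = true
              from by decide),
            if_neg (show ¬ PySem.Chars.isIn [d] " ABCDEFGHIJKLMNOPQRSTUVWXYZ".toList = true
              from by simpa using hc)]
        · simp only [Function.comp, if_neg hd]
      · intro d hd hbad
        rcases List.mem_map.mp hd with ⟨e, he, rfl⟩
        by_cases hec : e = c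
        · rw [hec, if_pos rfl] at hbad
          exact absurd hbad (by decide)
        · simp only [if_neg hec] at hbad ⊢
          have := h e he hbad
          simp only [List.mem_cons] at this
          exact this.resolve_left hec
    · rw [if_neg hc]
      rw [ih acc ?_]
      intro d hd hbad
      have := h d hd hbad
      simp only [List.mem_cons] at this
      rcases this with rfl | h'
      · exact absurd hbad (by simpa using hc)
      · exact h'

-- ---- A's while loop = fold over the non-overlapping pairs ----
lemma pv_step_eq (d : PySem.Dict String Int) (bg : String) :
    (if d.contains bg then d.modify bg 0 (fun v => v + 1) else d.insert bg 1)
      = d.insert bg (d.getD bg 0 + 1) := by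
  by_cases hc : d.contains bg = true
  · rw [if_pos hc]; rfl
  · rw [if_neg hc, PySem.Dict.getD_of_not_contains d 0 (by simpa using hc)]
    norm_num

lemma pv_whileA_shift (t : List Char) (i : Nat) (d : PySem.Dict String Int) (a b : Char) :
    pvWhileA (a :: b :: t) (i + 2) d = pvWhileA t i d := by
  by_cases hlt : i < t.length - 1
  · rw [pvWhileA, if_pos (by simp only [List.length_cons]; omega)]
    conv_rhs => rw [pvWhileA]
    rw [if_pos hlt]
    simp only [List.getD_cons_succ]
    exact pv_whileA_shift t (i + 2) _ a b
  · rw [pvWhileA, if_neg (by simp only [List.length_cons]; omega)]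
    conv_rhs => rw [pvWhileA]
    rw [if_neg hlt]
termination_by t.length - i
decreasing_by omega

lemma pv_whileA_eq_pairs (w : List Char) : ∀ (d : PySem.Dict String Int),
    pvWhileA w 0 d = (pvPairsB w).foldl pvTally d := by
  induction w using pvPairsB.induct with
  | case1 a b t ih =>
    intro d
    rw [pvWhileA, if_pos (by simp only [List.length_cons]; omega)]
    simp only [List.getD_cons_zero, List.getD_cons_succ]
    rw [pv_step_eq, pv_whileA_shift, ih]
    rfl
  | case2 w hw =>
    intro d
    match w, hw with
    | [], _ => rw [pvWhileA, if_neg (by simp)]; rfl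
    | [a], _ => rw [pvWhileA, if_neg (by simp)]; rfl
    | a :: b :: t, hw => exact ((hw a b t rfl)).elim

-- ---- structure of split(): leading-space, and leading-word decompositions ----
lemma pv_go_acc_out (t : List Char) : ∀ (cur : List Char) (acc : List (List Char)),
    PySem.Chars.split₀.go t cur acc = acc.reverse ++ PySem.Chars.split₀.go t cur [] := by
  induction t with
  | nil =>
    intro cur acc
    rw [PySem.Chars.split₀.go, PySem.Chars.split₀.go]
    by_cases hcur : cur.isEmpty = true
    · rw [if_pos hcur, if_pos hcur]; simp
    · rw [if_neg hcur, if_neg hcur]; simp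
  | cons c t ih =>
    intro cur acc
    rw [PySem.Chars.split₀.go]
    conv_rhs => rw [PySem.Chars.split₀.go]
    by_cases hs : PySem.Chars.isspace c = true
    · rw [if_pos hs, if_pos hs]
      by_cases hcur : cur.isEmpty = true
      · rw [if_pos hcur, if_pos hcur]
        exact ih [] acc
      · rw [if_neg hcur, if_neg hcur]
        rw [ih [] (cur.reverse :: acc), ih [] [cur.reverse]]
        simp
    · rw [if_neg hs, if_neg hs]
      exact ih (c :: cur) acc

lemma pv_split₀_space (c : Char) (t : List Char) (h : PySem.Chars.isspace c = true) :
    PySem.Chars.split₀ (c :: t) = PySem.Chars.split₀ t := by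
  rw [PySem.Chars.split₀, PySem.Chars.split₀, PySem.Chars.split₀.go, h]
  simp

lemma pv_go_word (t : List Char) : ∀ (cur : List Char), cur ≠ [] →
    PySem.Chars.split₀.go t cur []
      = (cur.reverse ++ t.takeWhile (fun c => !PySem.Chars.isspace c))
          :: PySem.Chars.split₀ (t.dropWhile (fun c => !PySem.Chars.isspace c)) := by
  induction t with
  | nil =>
    intro cur hcur
    rw [PySem.Chars.split₀.go, if_neg (by simpa using hcur)]
    simp [PySem.Chars.split₀, PySem.Chars.split₀.go]
  | cons c t ih =>
    intro cur hcur
    rw [PySem.Chars.split₀.go]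
    by_cases hs : PySem.Chars.isspace c = true
    · rw [if_pos hs, if_neg (by simpa using hcur)]
      rw [pv_go_acc_out t [] [cur.reverse]]
      simp only [List.takeWhile_cons, List.dropWhile_cons, hs, Bool.not_true,
        Bool.false_eq_true, if_false]
      rw [show PySem.Chars.split₀.go t [] [] = PySem.Chars.split₀ t from rfl]
      rw [pv_split₀_space c t hs]
      simp
    · rw [if_neg hs]
      rw [ih (c :: cur) (by simp)]
      simp only [List.takeWhile_cons, List.dropWhile_cons]
      rw [show PySem.Chars.isspace c = false from by simpa using hs]
      simp

lemma pv_split₀_word (c : Char) (t : List Char) (h : PySem.Chars.isspace c = false) :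
    PySem.Chars.split₀ (c :: t)
      = (c :: t.takeWhile (fun c => !PySem.Chars.isspace c))
          :: PySem.Chars.split₀ (t.dropWhile (fun c => !PySem.Chars.isspace c)) := by
  rw [PySem.Chars.split₀, PySem.Chars.split₀.go, h]
  simp only [Bool.false_eq_true, if_false]
  rw [pv_go_word t [c] (by simp)]
  simp

-- ---- B's stream over one word followed by a boundary = the word's pair fold ----
lemma pv_stream_chunk (w : List Char) : ∀ (rest : List Char) (d : PySem.Dict String Int),
    (∀ c ∈ w, pvIsLetter c = true) →
    (rest = [] ∨ ∃ c t, rest = c :: t ∧ pvIsLetter c = false) →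
    ((w ++ rest).foldl pvStepB (none, d)).2
      = (rest.foldl pvStepB (none, (pvPairsB w).foldl pvTally d)).2 := by
  induction w using pvPairsB.induct with
  | case1 a b t ih =>
    intro rest d hw hrest
    simp only [List.cons_append, List.foldl_cons]
    rw [show pvStepB (none, d) a = (some a, d) from by
        simp [pvStepB, hw a (by simp)]]
    rw [show pvStepB (some a, d) b = (none, pvTally d (a, b)) from by
        simp [pvStepB, hw b (by simp), pvTally]]
    rw [show (pvPairsB (a :: b :: t)).foldl pvTally d
        = (pvPairsB t).foldl pvTally (pvTally d (a, b)) from rfl]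
    exact ih rest _ (fun c hc => hw c (by simp [hc])) hrest
  | case2 w hw2 =>
    intro rest d hw hrest
    match w, hw2 with
    | [], _ => simp [pvPairsB]
    | [a], _ =>
      simp only [List.cons_append, List.nil_append, List.foldl_cons]
      rw [show pvStepB (none, d) a = (some a, d) from by
          simp [pvStepB, hw a (by simp)]]
      rcases hrest with rfl | ⟨c, t, rfl, hc⟩
      · simp [pvPairsB]
      · simp only [List.foldl_cons]
        rw [show pvStepB (some a, d) c = (none, d) from by simp [pvStepB, hc],
          show (pvPairsB [a]).foldl pvTally d = d from rfl,
          show pvStepB (none, d) c = (none, d) from by simp [pvStepB, hc]]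
    | a :: b :: t, hw2 => exact ((hw2 a b t rfl)).elim

lemma pv_dropWhile_head (P : Char → Bool) : ∀ (t : List Char) (r : Char) (r' : List Char),
    t.dropWhile P = r :: r' → P r = false := by
  intro t
  induction t with
  | nil => intro r r' h; simp at h
  | cons c t ih =>
    intro r r' h
    rw [List.dropWhile_cons] at h
    by_cases hc : P c = true
    · rw [if_pos hc] at h; exact ih r r' h
    · rw [if_neg hc] at h
      cases h
      simpa using hc

-- ---- B's whole stream = A's fold over the split words ----
lemma pv_stream_eq_words (n : Nat) : ∀ (m : List Char), m.length ≤ n →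
    (∀ c ∈ m, pvGood c) → ∀ (d : PySem.Dict String Int),
    (m.foldl pvStepB (none, d)).2
      = (PySem.Chars.split₀ m).foldl (fun d w => (pvPairsB w).foldl pvTally d) d := by
  induction n with
  | zero =>
    intro m hm _ d
    have : m = [] := by cases m <;> simp_all
    subst this; rfl
  | succ n ih =>
    intro m hm hgood d
    match m with
    | [] => rfl
    | c :: t =>
      by_cases hl : pvIsLetter c = true
      · -- a word starts here
        have hns : PySem.Chars.isspace c = false := pv_letter_nonspace c hl
        set P : Char → Bool := fun c => !PySem.Chars.isspace c with hP
        have hsplit : c :: t = (c :: t.takeWhile P) ++ t.dropWhile P := by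
          simp [List.takeWhile_append_dropWhile]
        have hWletters : ∀ x ∈ c :: t.takeWhile P, pvIsLetter x = true := by
          intro x hx
          rcases List.mem_cons.mp hx with rfl | hx'
          · exact hl
          · have hxp : P x = true := List.mem_takeWhile_imp hx'
            have hxm : x ∈ t := List.takeWhile_subset P hx'
            exact pv_good_nonspace_letter x (hgood x (by simp [hxm]))
              (by simpa [hP] using hxp)
        have hrest : t.dropWhile P = [] ∨
            ∃ r r', t.dropWhile P = r :: r' ∧ pvIsLetter r = false := by
          match hd : t.dropWhile P with
          | [] => exact Or.inl rfl
          | r :: r' =>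
            refine Or.inr ⟨r, r', rfl, ?_⟩
            have hPr : P r = false := pv_dropWhile_head P t r r' hd
            by_cases hrl : pvIsLetter r = true
            · have := pv_letter_nonspace r hrl
              simp [hP, this] at hPr
            · simpa using hrl
        have hchunk := pv_stream_chunk (c :: t.takeWhile P) (t.dropWhile P) d
          hWletters hrest
        rw [show (c :: t).foldl pvStepB (none, d)
            = ((c :: t.takeWhile P) ++ t.dropWhile P).foldl pvStepB (none, d) from by
            rw [← hsplit]]
        rw [hchunk]
        rw [ih (t.dropWhile P)
            (by have := List.length_dropWhile_le P t; simp at hm; omega)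
            (fun x hx => hgood x (by simp [List.dropWhile_subset P hx]))]
        rw [pv_split₀_word c t hns]
        rfl
      · -- a separator: in A's keep-set the non-letter is the space
        have hsp : c = ' ' := pv_good_nonletter_space c (hgood c (by simp)) (by simpa using hl)
        subst hsp
        rw [pv_split₀_space ' ' t (by decide)]
        simp only [List.foldl_cons]
        rw [show pvStepB (none, d) ' ' = (none, d) from by simp [pvStepB]; decide]
        exact ih t (by simp at hm; omega) (fun x hx => hgood x (by simp [hx])) d

-- B's stream is insensitive to the cleaning map (letters unchanged, non-letters all reset)
lemma pv_stepB_clean (st : Option Char × PySem.Dict String Int) (c : Char) :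
    pvStepB st (pvClean c) = pvStepB st c := by
  by_cases h : PySem.Chars.isIn [c] " ABCDEFGHIJKLMNOPQRSTUVWXYZ".toList = true
  · rw [show pvClean c = c from if_pos h]
  · have h1 : pvIsLetter c = false := by
      by_cases hl : pvIsLetter c = true
      · exact absurd (pv_letter_good c hl) h
      · simpa using hl
    rw [show pvClean c = ' ' from if_neg h]
    unfold pvStepB
    rw [h1, show pvIsLetter ' ' = false from by decide]
    simp

lemma pv_stream_clean (l : List Char) (s : Option Char × PySem.Dict String Int) :
    (l.map pvClean).foldl pvStepB s = l.foldl pvStepB s := by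
  rw [List.foldl_map]
  simp only [pv_stepB_clean]

-- ===== VERDICT (by name: the statement is the Claim_ definition above) =====
theorem getCTBigrams_spec : Claim_equal_getCTBigrams := by
  intro ciphertext _
  unfold Spec_getCTBigrams getCTBigrams getCTBigrams_alt pvPreprocA
  dsimp only
  rw [pv_foldl_clean _ _ (fun d hd _ => hd)]
  rw [List.foldl_map]
  congr 1
  have hfun : (fun (d : PySem.Dict String Int) (w : List Char) =>
        if PySem.Str.len (String.ofList w) == 1 then d
        else pvWhileA (String.ofList w).toList 0 d)
      = fun d w => (pvPairsB w).foldl pvTally d := by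
    funext d w
    simp only [String.toList_ofList, PySem.Str.len_eq]
    by_cases h1 : w.length = 1
    · rw [if_pos (by simpa using h1)]
      match w, h1 with
      | [a], _ => rfl
    · rw [if_neg (by simpa using h1), pv_whileA_eq_pairs]
  rw [hfun]
  rw [← pv_stream_clean ((PySem.Str.upper ciphertext).toList) (none, PySem.Dict.mk [])]
  rw [pv_stream_eq_words (((PySem.Str.upper ciphertext).toList.map pvClean).length)
      ((PySem.Str.upper ciphertext).toList.map pvClean) le_rfl
      (by intro c hc; rcases List.mem_map.mp hc with ⟨e, _, rfl⟩; exact pv_clean_good e)]
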